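-- pv_equiv track=rewrite | github.com/seqeralabs/seqera-kit | tw_pywrap/helper.py | get_values_from_cmd_args
-- ===== SOURCE A (Python) =====
-- def get_values_from_cmd_args(cmd_args, keys):
--     values = {key: None for key in keys}
--     key = None
--
--     for arg in cmd_args:
--         if arg.startswith("--"):
--             key = arg[2:]
--         else:
--             if key and key in keys:
--                 values[key] = arg
--             key = None
--     return values
-- ===== SOURCE B (Python) =====
-- def get_values_from_cmd_args(cmd_args, keys):
--     values = {key: None for key in keys}
--     for cur, nxt in zip(cmd_args, cmd_args[1:]):
--         if cur.startswith("--"):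
--             k = cur[2:]
--             if k and k in keys and not nxt.startswith("--"):
--                 values[k] = nxt
--     return values
-- ===== Notes on version B (the rewrite author's own statement) =====
-- stated objective: simpler
-- what changed: Replaced the carried key/reset state machine with a stateless single pass over adjacent pairs zip(cmd_args, cmd_args[1:]), assigning a flag's value directly from its successor.
import Mathlib
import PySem

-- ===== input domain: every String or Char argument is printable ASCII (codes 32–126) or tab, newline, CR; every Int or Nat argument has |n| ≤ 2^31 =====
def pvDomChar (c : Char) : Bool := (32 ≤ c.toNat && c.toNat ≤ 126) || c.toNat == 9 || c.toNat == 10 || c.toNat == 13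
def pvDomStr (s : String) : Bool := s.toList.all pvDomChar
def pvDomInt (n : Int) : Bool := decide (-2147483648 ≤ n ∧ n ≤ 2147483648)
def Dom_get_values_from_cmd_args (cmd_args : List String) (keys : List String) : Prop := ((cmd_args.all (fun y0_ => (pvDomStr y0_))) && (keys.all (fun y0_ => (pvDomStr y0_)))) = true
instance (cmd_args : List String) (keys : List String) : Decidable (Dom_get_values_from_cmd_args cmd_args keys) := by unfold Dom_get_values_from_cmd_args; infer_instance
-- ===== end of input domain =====

-- B replaces A's carried key/reset state machine by a stateless pass over adjacent pairs
-- zip(cmd_args, cmd_args[1:]) (objective: simpler).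

-- ===== PORT A =====
-- `values = {key: None for key in keys}` (shared line of both Pythons)
def pvInit (keys : List String) : PySem.Dict String (Option String) :=
  keys.foldl (fun d k => d.insert k none) PySem.Dict.empty

-- A's loop, carrying the current dict and the pending `key` (None or the last flag's name)
def pvLoopA (keys : List String) : List String → PySem.Dict String (Option String) →
    Option String → PySem.Dict String (Option String)
  | [], d, _ => d
  | a :: t, d, key =>
    if PySem.Str.startswith a "--" then
      pvLoopA keys t d (some (PySem.Str.slice a (some 2) none))
    else
      pvLoopA keys t
        (match key with
         | some k => if k ≠ "" ∧ k ∈ keys then d.insert k (some a) else d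
         | none => d)
        none

def get_values_from_cmd_args (cmd_args : List String) (keys : List String) :
    List (String × Option String) :=
  (pvLoopA keys cmd_args (pvInit keys) none).items

-- ===== PORT B =====
-- body of B's `for cur, nxt in zip(...)` loop
def pvStepB (keys : List String) (d : PySem.Dict String (Option String)) (p : String × String) :
    PySem.Dict String (Option String) :=
  if PySem.Str.startswith p.1 "--" then
    let k := PySem.Str.slice p.1 (some 2) none
    if k ≠ "" ∧ k ∈ keys ∧ ¬ PySem.Str.startswith p.2 "--" = true then d.insert k (some p.2) else d
  else d

def get_values_from_cmd_args_alt (cmd_args : List String) (keys : List String) :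
    List (String × Option String) :=
  ((cmd_args.zip (PySem.List.slice cmd_args (some 1) none)).foldl (pvStepB keys) (pvInit keys)).items

-- ===== PRECONDITION & SPEC =====
def Spec_get_values_from_cmd_args (cmd_args : List String) (keys : List String) (out : List (String × Option String)) : Prop := out = get_values_from_cmd_args_alt cmd_args keys
instance (cmd_args : List String) (keys : List String) (out : List (String × Option String)) : Decidable (Spec_get_values_from_cmd_args cmd_args keys out) := by unfold Spec_get_values_from_cmd_args; infer_instance

-- ===== CLAIM (what is proved, stated in full; the proofs are below) =====
def Claim_equal_get_values_from_cmd_args : Prop := ∀ (cmd_args : List String) (keys : List String), Dom_get_values_from_cmd_args cmd_args keys → Spec_get_values_from_cmd_args cmd_args keys (get_values_from_cmd_args cmd_args keys)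

-- ===== LEMMAS AND PROOFS =====

-- the effect of A's pending key on the dict, given the next element (if any)
def pvPend (keys : List String) (d : PySem.Dict String (Option String))
    (key : Option String) (h : Option String) : PySem.Dict String (Option String) :=
  match key, h with
  | some k, some a =>
    if (k ≠ "" ∧ k ∈ keys) ∧ ¬ PySem.Str.startswith a "--" = true then d.insert k (some a) else d
  | _, _ => d

theorem pvLoopA_eq_foldB (keys : List String) (lst : List String) :
    ∀ (d : PySem.Dict String (Option String)) (key : Option String),
    pvLoopA keys lst d key =
      (lst.zip lst.tail).foldl (pvStepB keys) (pvPend keys d key lst.head?) := by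
  induction lst with
  | nil => intro d key; cases key <;> rfl
  | cons a t ih =>
    intro d key
    cases t with
    | nil =>
      cases key with
      | none => simp [pvLoopA, pvPend]
      | some k =>
        simp only [pvLoopA, pvPend, List.head?]
        by_cases hf : PySem.Chars.startswith a.toList ['-', '-'] = true
        · simp [hf]
        · simp [hf]
          try split_ifs with h1 h2 <;> first | rfl | simp_all
    | cons b t' =>
      have hz : (a :: b :: t').zip (a :: b :: t').tail
          = (a, b) :: ((b :: t').zip (b :: t').tail) := rfl
      rw [hz, List.foldl_cons]
      by_cases hf : PySem.Chars.startswith a.toList ['-', '-'] = true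
      · have hL : pvLoopA keys (a :: b :: t') d key
            = pvLoopA keys (b :: t') d (some (PySem.Str.slice a (some 2) none)) := by
          simp [pvLoopA, hf]
        rw [hL, ih]
        congr 1
        simp only [List.head?_cons]
        -- pvPend d key (some a) = d since a is a flag; then pvStepB on (a,b) = pvPend for the new key
        have hp : pvPend keys d key (some a) = d := by
          cases key with
          | none => rfl
          | some k => simp [pvPend, hf]
        rw [hp]
        simp only [pvStepB, pvPend]
        split_ifs with h1 h2 <;> simp_all [and_assoc]
      · have hL : pvLoopA keys (a :: b :: t') d key
            = pvLoopA keys (b :: t')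
                (match key with
                 | some k => if k ≠ "" ∧ k ∈ keys then d.insert k (some a) else d
                 | none => d) none := by
          simp [pvLoopA, hf]
        rw [hL, ih]
        congr 1
        simp only [List.head?_cons]
        have hs : pvStepB keys (pvPend keys d key (some a)) (a, b)
            = pvPend keys d key (some a) := by simp [pvStepB, hf]
        rw [hs]
        cases key with
        | none => rfl
        | some k => simp [pvPend, hf]

-- ===== VERDICT (by name: the statement is the Claim_ definition above) =====
theorem get_values_from_cmd_args_spec : Claim_equal_get_values_from_cmd_args := by
  intro cmd_args keys _
  unfold Spec_get_values_from_cmd_args get_values_from_cmd_args get_values_from_cmd_args_alt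
  rw [pvLoopA_eq_foldB]
  have hp : pvPend keys (pvInit keys) none cmd_args.head? = pvInit keys := by
    cases cmd_args <;> rfl
  rw [hp, PySem.List.slice_from_one]
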